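-- pv_equiv track=rewrite | github.com/gourav2211/PYTHONPRACTICE | BinarySearch.py | BinaryCounting
-- ===== SOURCE A (Python) =====
-- def BinaryCounting(arr):
--     low = 0
--     high = len(arr) - 1
--     if (arr[low] == 0):
--         return -1
--     while (low <= high):
--         mid = int((low + high)/2)
--         if (arr[mid] == 1):
--             low = mid + 1
--         elif (arr[mid] != 1):
--             high = mid - 1
--             mid = mid - 1
--     return (mid + 1)
-- ===== SOURCE B (Python) =====
-- def BinaryCounting(arr):
--     if arr[0] == 0:
--         return -1
--
--     def go(low, width):
--         # search interval is [low, low + width - 1]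
--         if width == 0:
--             return low
--         half = (width - 1) // 2
--         mid = low + half
--         if arr[mid] == 1:
--             return go(mid + 1, width - 1 - half)
--         return go(low, half)
--
--     return go(0, len(arr))
-- ===== Notes on version B (the rewrite author's own statement) =====
-- stated objective: alternative
-- what changed: A's iterative while-loop mutating (low, high, mid) and returning a patched mid+1 is replaced by a recursion on the interval WIDTH: go(low, width) halves the width each call and returns low when the width reaches 0, so termination is structural and no mid is carried.
import Mathlib
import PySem

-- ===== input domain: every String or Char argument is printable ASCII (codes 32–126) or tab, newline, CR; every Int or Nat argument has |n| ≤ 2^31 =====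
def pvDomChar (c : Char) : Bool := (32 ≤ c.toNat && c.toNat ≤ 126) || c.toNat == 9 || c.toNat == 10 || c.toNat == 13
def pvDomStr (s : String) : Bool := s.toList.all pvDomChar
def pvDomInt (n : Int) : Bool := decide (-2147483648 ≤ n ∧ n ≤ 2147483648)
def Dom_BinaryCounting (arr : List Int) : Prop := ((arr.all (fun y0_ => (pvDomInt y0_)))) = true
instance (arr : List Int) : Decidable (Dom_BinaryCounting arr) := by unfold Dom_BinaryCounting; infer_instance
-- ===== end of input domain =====

-- B replaces A's mutable (low, high, mid) while-loop by a recursion on the interval WIDTH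
-- (go low width, returning low at width 0); same O(log n) cost — objective: alternative decomposition.


-- ===== PORT A =====
-- The while loop: state (low, high, mid); `mid = int((low+high)/2)` truncates toward 0, but inside the
-- loop 0 ≤ low ≤ high (and |values| ≤ 2^31 keep the float exact), so it equals floor division.
-- The index mid is always in range on reachable states; `.getD 0` covers the unreachable none case.
-- `fuel` is only a totality guard: each iteration shrinks high+1-low by at least 1, so
-- fuel = arr.length (the initial span) is never exhausted.
def BinaryCountingLoop (arr : List Int) (fuel : Nat) (low high mid : Int) : Int :=
  match fuel with
  | 0 => mid + 1
  | f + 1 =>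
    if low ≤ high then
      let m := PySem.Int.floordiv (low + high) 2
      if (PySem.List.pyGet? arr m).getD 0 == 1 then
        BinaryCountingLoop arr f (m + 1) high m
      else
        BinaryCountingLoop arr f low (m - 1) (m - 1)
    else
      mid + 1

def BinaryCounting (arr : List Int) : Int :=
  let low : Int := 0
  let high : Int := (arr.length : Int) - 1
  -- indexing arr at low raises IndexError on the empty list; Pre_ excludes that input.
  if (PySem.List.pyGet? arr low).getD 0 == 0 then -1
  else BinaryCountingLoop arr arr.length low high 0

-- ===== PORT B =====
-- go(low, width) of Source B; the recursion is structural on width (a Nat), so no fuel is needed.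
-- Source B's `half = (width - 1) // 2` is, with width = w + 1, exactly the Nat division w / 2.
def BinaryCountingGo (arr : List Int) (low : Int) : Nat → Int
  | 0 => low
  | w + 1 =>
    let half : Nat := w / 2
    let mid : Int := low + (half : Int)
    if (PySem.List.pyGet? arr mid).getD 0 == 1 then
      BinaryCountingGo arr (mid + 1) (w - half)
    else
      BinaryCountingGo arr low half
decreasing_by all_goals omega

def BinaryCounting_alt (arr : List Int) : Int :=
  if (PySem.List.pyGet? arr 0).getD 0 == 0 then -1
  else BinaryCountingGo arr 0 arr.length

-- ===== PRECONDITION & SPEC =====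
-- Pre_ excludes only the empty list, on which both A and B raise IndexError indexing the first element.
def Pre_BinaryCounting (arr : List Int) : Prop := arr ≠ []
instance (arr : List Int) : Decidable (Pre_BinaryCounting arr) := by unfold Pre_BinaryCounting; infer_instance
def pvWitness_BinaryCounting : List Int := [1, 1, 0]

def Spec_BinaryCounting (arr : List Int) (out : Int) : Prop := out = BinaryCounting_alt arr
instance (arr : List Int) (out : Int) : Decidable (Spec_BinaryCounting arr out) := by unfold Spec_BinaryCounting; infer_instance

-- ===== CLAIM (what is proved, stated in full; the proofs are below) =====
def Claim_equal_BinaryCounting : Prop := ∀ (arr : List Int), Dom_BinaryCounting arr → Pre_BinaryCounting arr → Spec_BinaryCounting arr (BinaryCounting arr)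

-- ===== LEMMAS AND PROOFS =====

-- A's midpoint floor((low+high)/2) is low + half where half = (width-1)/2 in Nat, width = high+1-low.
theorem mid_eq_low_add_half (low high : Int) (w : Nat)
    (hw : high + 1 - low = (w : Int) + 1) :
    PySem.Int.floordiv (low + high) 2 = low + ((w / 2 : Nat) : Int) := by
  rw [PySem.Int.floordiv_eq_iff_of_pos (by omega : (0:Int) < 2)]
  omega

-- Core invariant: with fuel at least the span, A's loop (any carried `mid`) equals B's
-- width recursion on that span — both compute the final `low` of the search.
theorem loop_eq_go (arr : List Int) :
    ∀ (fuel : Nat) (low high mid : Int) (w : Nat), (w : Int) = high + 1 - low → w ≤ fuel →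
      1 ≤ w → BinaryCountingLoop arr fuel low high mid = BinaryCountingGo arr low w := by
  intro fuel
  induction fuel with
  | zero => intro low high mid w hw hf h1; omega
  | succ f ih =>
    intro low high mid w hw hf h1
    obtain ⟨v, rfl⟩ : ∃ v, w = v + 1 := ⟨w - 1, by omega⟩
    have hm := mid_eq_low_add_half low high v (by omega)
    rw [BinaryCountingLoop, BinaryCountingGo]
    simp only [if_pos (by omega : low ≤ high), hm]
    set half : Nat := v / 2 with hhalf
    set m : Int := low + (half : Int) with hmdef
    by_cases hv : (PySem.List.pyGet? arr m).getD 0 == 1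
    · simp only [if_pos hv]
      by_cases h2 : 1 ≤ v - half
      · exact ih (m + 1) high m (v - half) (by omega) (by omega) h2
      · -- the new interval is empty: loop's next step returns m + 1 = go's base value
        have hz : v - half = 0 := by omega
        rw [hz]
        cases f with
        | zero => simp only [BinaryCountingLoop, BinaryCountingGo]
        | succ f' =>
          rw [BinaryCountingLoop, BinaryCountingGo]
          simp only [if_neg (by omega : ¬ m + 1 ≤ high)]
    · simp only [if_neg hv]
      by_cases h2 : 1 ≤ half
      · exact ih low (m - 1) (m - 1) half (by omega) (by omega) h2
      · -- half = 0, so m = low: loop's next step returns (m - 1) + 1 = low = go's base value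
        have hz : half = 0 := by omega
        rw [hz]
        cases f with
        | zero => simp only [BinaryCountingLoop, BinaryCountingGo]; omega
        | succ f' =>
          rw [BinaryCountingLoop, BinaryCountingGo]
          simp only [if_neg (by omega : ¬ low ≤ m - 1)]
          omega

-- ===== VERDICT (by name: the statement is the Claim_ definition above) =====
theorem BinaryCounting_spec : Claim_equal_BinaryCounting := by
  intro arr _ hpre
  unfold Spec_BinaryCounting BinaryCounting BinaryCounting_alt
  simp only []
  by_cases h0 : (PySem.List.pyGet? arr 0).getD 0 == 0
  · simp [h0]
  · simp only [if_neg h0]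
    have hne : arr.length ≠ 0 := fun h => hpre (List.eq_nil_of_length_eq_zero h)
    exact loop_eq_go arr arr.length 0 ((arr.length : Int) - 1) 0 arr.length (by omega) le_rfl (by omega)
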